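-- pv_equiv track=rewrite | github.com/maorshutman/project-euler | prob_77/sol_77.py | seq_to_tuple_rep
-- ===== SOURCE A (Python) =====
-- def seq_to_tuple_rep(seq):
--     seq_dict = dict()
--
--     for p in seq:
--         if p in seq_dict:
--             seq_dict[p] += 1
--         else:
--             seq_dict[p] = 1
--
--     seq_str_rep = dict_to_tuple(seq_dict)
--
--     return seq_str_rep
--
-- def dict_to_tuple(d):
--     keys = sorted(d.keys())
--     pairs = []
--     for key in keys:
--         pairs.append((key, d[key]))
--     return tuple(pairs)
-- ===== SOURCE B (Python) =====
-- def seq_to_tuple_rep(seq):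
--     # Sort first, then one pass grouping consecutive equal runs; no dict,
--     # output is sorted by construction.
--     xs = sorted(seq)
--     pairs = []
--     i = 0
--     n = len(xs)
--     while i < n:
--         j = i + 1
--         while j < n and xs[j] == xs[i]:
--             j += 1
--         pairs.append((xs[i], j - i))
--         i = j
--     return tuple(pairs)
-- ===== Notes on version B (the rewrite author's own statement) =====
-- stated objective: alternative
-- what changed: Replaces the frequency dict plus sorted-keys pass with sort-then-group: sort the sequence once and emit one (value, run-length) pair per maximal run of equal consecutive elements.
import Mathlib
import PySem

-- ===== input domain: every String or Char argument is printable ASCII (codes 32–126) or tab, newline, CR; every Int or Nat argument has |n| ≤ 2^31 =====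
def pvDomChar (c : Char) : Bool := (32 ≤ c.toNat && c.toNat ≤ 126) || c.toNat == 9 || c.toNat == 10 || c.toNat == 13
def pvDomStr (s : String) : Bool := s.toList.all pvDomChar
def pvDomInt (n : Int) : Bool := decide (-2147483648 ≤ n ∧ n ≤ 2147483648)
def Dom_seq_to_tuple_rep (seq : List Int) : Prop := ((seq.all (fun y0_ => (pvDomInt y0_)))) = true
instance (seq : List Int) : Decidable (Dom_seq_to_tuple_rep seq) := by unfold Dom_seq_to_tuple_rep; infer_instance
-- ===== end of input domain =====

-- B replaces A's frequency dict + sorted-keys pass by sort-then-group-consecutive-runs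
-- (alternative algorithm, same cost class); return values proved equal on every input.

-- ===== PORT A =====
-- dict_to_tuple(d): sorted keys, then append (key, d[key]) pairs.
-- d[key] never raises here since every key comes from d.keys; getD 0 is exact on that path.
def dict_to_tuple (d : PySem.Dict Int Int) : List (Int × Int) :=
  let keys := PySem.List.sorted d.keys (fun k => k) false
  keys.foldl (fun pairs key => pairs ++ [(key, d.getD key 0)]) []

def seq_to_tuple_rep (seq : List Int) : List (Int × Int) :=
  let seq_dict := seq.foldl
    (fun d p => if d.contains p then d.insert p (d.getD p 0 + 1) else d.insert p 1)
    PySem.Dict.empty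
  dict_to_tuple seq_dict

-- ===== PORT B =====
-- the outer while loop of Source B: each step consumes one maximal run of equal elements
-- (the inner 'while xs[j] == xs[i]' is the takeWhile/dropWhile pair) and emits one pair.
def groupRuns : List Int → List (Int × Int)
  | [] => []
  | x :: xs =>
      (x, 1 + ((xs.takeWhile (fun z => z == x)).length : Int)) ::
        groupRuns (xs.dropWhile (fun z => z == x))
termination_by l => l.length
decreasing_by
  simp only [List.length_cons]
  exact Nat.lt_succ_of_le (List.length_dropWhile_le _ _)

def seq_to_tuple_rep_alt (seq : List Int) : List (Int × Int) :=
  groupRuns (PySem.List.sorted seq (fun x => x) false)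

-- ===== PRECONDITION & SPEC =====
def Spec_seq_to_tuple_rep (seq : List Int) (out : List (Int × Int)) : Prop := out = seq_to_tuple_rep_alt seq
instance (seq : List Int) (out : List (Int × Int)) : Decidable (Spec_seq_to_tuple_rep seq out) := by unfold Spec_seq_to_tuple_rep; infer_instance

-- ===== CLAIM (what is proved, stated in full; the proofs are below) =====
def Claim_equal_seq_to_tuple_rep : Prop := ∀ (seq : List Int), Dom_seq_to_tuple_rep seq → Spec_seq_to_tuple_rep seq (seq_to_tuple_rep seq)

-- ===== LEMMAS AND PROOFS =====

-- A's loop body equals the counter step (the branch only splits the first insertion off).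
theorem stepA_eq :
    (fun (d : PySem.Dict Int Int) p =>
        if d.contains p then d.insert p (d.getD p 0 + 1) else d.insert p 1) =
    (fun (d : PySem.Dict Int Int) p => d.insert p (d.getD p 0 + 1)) := by
  funext d p
  by_cases h : d.contains p
  · simp [h]
  · simp [h, PySem.Dict.getD_of_not_contains d 0 (by simpa using h)]

theorem foldl_append_map {α β : Type} (l : List α) (f : α → β) (acc : List β) :
    l.foldl (fun ps k => ps ++ [f k]) acc = acc ++ l.map f := by
  induction l generalizing acc with
  | nil => simp
  | cons x xs ih => simp [ih]

theorem dropWhile_gt (x : Int) (xs : List Int)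
    (hs : ∀ z ∈ xs, x ≤ z) (hp : xs.Pairwise (· ≤ ·)) :
    ∀ z ∈ xs.dropWhile (fun z => z == x), x < z := by
  induction xs with
  | nil => simp
  | cons y ys ih =>
      by_cases h : y = x
      · subst h
        simp only [List.dropWhile_cons, beq_self_eq_true, if_true]
        exact ih (fun z hz => hs z (List.mem_cons_of_mem _ hz)) hp.tail
      · have hy : x < y := lt_of_le_of_ne (hs y (by simp)) (Ne.symm h)
        simp only [List.dropWhile_cons, beq_iff_eq, h, if_false]
        intro z hz
        rcases List.mem_cons.mp hz with rfl | hz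
        · exact hy
        · exact lt_of_lt_of_le hy ((List.pairwise_cons.mp hp).1 z hz)

theorem count_takeWhile_eq (x : Int) (xs : List Int) :
    (xs.takeWhile (fun z => z == x)).count x = (xs.takeWhile (fun z => z == x)).length := by
  rw [List.count_eq_length]
  intro a ha
  have h := List.mem_takeWhile_imp ha
  simp only [beq_iff_eq] at h
  omega

-- The heart: on a nondecreasing list, groupRuns has strictly increasing firsts,
-- its firsts are exactly the members, and each second is the count of its first.
theorem groupRuns_spec (ys : List Int) (hp : ys.Pairwise (· ≤ ·)) :
    ((groupRuns ys).map Prod.fst).Pairwise (· < ·) ∧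
    (∀ k, k ∈ (groupRuns ys).map Prod.fst ↔ k ∈ ys) ∧
    (∀ p ∈ groupRuns ys, p.2 = (ys.count p.1 : Int)) := by
  induction ys using groupRuns.induct with
  | case1 => refine ⟨?_, ?_, ?_⟩ <;> simp only [groupRuns] <;> simp
  | case2 x xs ih =>
      have hs : ∀ z ∈ xs, x ≤ z := (List.pairwise_cons.mp hp).1
      have hgt := dropWhile_gt x xs hs hp.tail
      have hd : (xs.dropWhile (fun z => z == x)).Pairwise (· ≤ ·) :=
        hp.tail.sublist (List.dropWhile_sublist _)
      obtain ⟨ihp, ihm, ihc⟩ := ih hd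
      have htw : ∀ z ∈ xs.takeWhile (fun z => z == x), z = x := by
        intro z hz; simpa using List.mem_takeWhile_imp hz
      have hxs : xs = xs.takeWhile (fun z => z == x) ++ xs.dropWhile (fun z => z == x) :=
        (List.takeWhile_append_dropWhile).symm
      have hmx : ∀ k : Int, k ∈ xs ↔
          k ∈ xs.takeWhile (fun z => z == x) ∨ k ∈ xs.dropWhile (fun z => z == x) := by
        intro k
        conv_lhs => rw [hxs]
        exact List.mem_append
      have hcx : ∀ k : Int, xs.count k =
          (xs.takeWhile (fun z => z == x)).count k + (xs.dropWhile (fun z => z == x)).count k := by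
        intro k
        conv_lhs => rw [hxs]
        exact List.count_append ..
      constructor
      · -- pairwise <
        simp only [groupRuns, List.map_cons, List.pairwise_cons]
        exact ⟨fun k hk => hgt k ((ihm k).mp hk), ihp⟩
      constructor
      · -- membership
        intro k
        simp only [groupRuns, List.map_cons, List.mem_cons, ihm]
        constructor
        · rintro (rfl | hk)
          · simp
          · exact Or.inr ((hmx k).mpr (Or.inr hk))
        · rintro (rfl | hk)
          · exact Or.inl rfl
          · rcases (hmx k).mp hk with hk | hk
            · exact Or.inl (htw k hk)
            · exact Or.inr hk
      · -- counts
        intro p hp'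
        simp only [groupRuns, List.mem_cons] at hp'
        rcases hp' with rfl | hp'
        · simp only
          have hcd : (xs.dropWhile (fun z => z == x)).count x = 0 := by
            rw [List.count_eq_zero]
            intro hmem
            exact absurd rfl (ne_of_gt (hgt x hmem))
          rw [List.count_cons_self, hcx x, hcd, count_takeWhile_eq]
          push_cast
          ring
        · have hc := ihc p hp'
          have hpmem : p.1 ∈ xs.dropWhile (fun z => z == x) :=
            (ihm p.1).mp (List.mem_map_of_mem hp')
          have hne : p.1 ≠ x := ne_of_gt (hgt _ hpmem)
          have hct : (xs.takeWhile (fun z => z == x)).count p.1 = 0 := by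
            rw [List.count_eq_zero]
            intro hmem
            exact hne (htw _ hmem)
          rw [hc, List.count_cons_of_ne hne.symm, hcx p.1, hct]
          simp

-- ===== VERDICT (by name: the statement is the Claim_ definition above) =====
theorem seq_to_tuple_rep_spec : Claim_equal_seq_to_tuple_rep := by
  intro seq _
  unfold Spec_seq_to_tuple_rep seq_to_tuple_rep seq_to_tuple_rep_alt dict_to_tuple
  dsimp only
  rw [stepA_eq, PySem.Dict.foldl_insert_getD_add_one_eq_counter]
  set ys := PySem.List.sorted seq (fun x => x) false with hys
  have hp : ys.Pairwise (· ≤ ·) := by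
    simpa using PySem.List.sorted_pairwise seq (fun x => x)
  obtain ⟨hlt, hmem, hcnt⟩ := groupRuns_spec ys hp
  have hperm : ys.Perm seq := PySem.List.sorted_perm seq (fun x => x) false
  -- the sorted distinct keys are exactly the firsts of groupRuns
  have hkeys : PySem.List.sorted (PySem.Dict.counter seq).keys (fun k => k) false
      = (groupRuns ys).map Prod.fst := by
    rw [PySem.Dict.keys_counter]
    apply PySem.List.sorted_eq_of_perm_of_pairwise_lt
    · rw [List.perm_ext_iff_of_nodup (hlt.imp ne_of_lt) (PySem.Set.nodup_ofList seq)]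
      intro k
      rw [hmem k, PySem.Set.mem_ofList]
      exact hperm.mem_iff
    · simpa using hlt
  rw [hkeys, foldl_append_map, List.nil_append, List.map_map]
  -- each pair rebuilds itself: snd is the count of fst
  conv_rhs => rw [show groupRuns ys = (groupRuns ys).map id from (List.map_id _).symm]
  apply List.map_congr_left
  intro p hpm
  have : (PySem.Dict.counter seq).getD p.1 0 = (seq.count p.1 : Int) :=
    PySem.Dict.getD_counter seq p.1
  simp only [Function.comp_apply, id]
  rw [this, ← hperm.count_eq, ← hcnt p hpm]
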